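-- pv_equiv track=rewrite | github.com/TheRealTurtler/Audio-Video-Scripts | add_audio_track_mt.py | getNearestValidBitrate
-- ===== SOURCE A (Python) =====
-- validBitrates = [x * 32000 for x in range(1, 11)]
--
-- def getNearestValidBitrate(bitrate):
-- 	validBitrate = 32000
-- 	for br in validBitrates:
-- 		if bitrate - br >= -32000 // 2:
-- 			validBitrate = br
-- 		else:
-- 			break
--
-- 	return validBitrate
-- ===== SOURCE B (Python) =====
-- def getNearestValidBitrate(bitrate):
-- 	k = (bitrate + 16000) // 32000
-- 	return max(1, min(10, k)) * 32000
-- ===== Notes on version B (the rewrite author's own statement) =====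
-- stated objective: simpler
-- what changed: Replaces the linear scan over the valid-bitrate list with a closed-form floor-division, clamped to the 1..10 multiplier range.
import Mathlib
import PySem

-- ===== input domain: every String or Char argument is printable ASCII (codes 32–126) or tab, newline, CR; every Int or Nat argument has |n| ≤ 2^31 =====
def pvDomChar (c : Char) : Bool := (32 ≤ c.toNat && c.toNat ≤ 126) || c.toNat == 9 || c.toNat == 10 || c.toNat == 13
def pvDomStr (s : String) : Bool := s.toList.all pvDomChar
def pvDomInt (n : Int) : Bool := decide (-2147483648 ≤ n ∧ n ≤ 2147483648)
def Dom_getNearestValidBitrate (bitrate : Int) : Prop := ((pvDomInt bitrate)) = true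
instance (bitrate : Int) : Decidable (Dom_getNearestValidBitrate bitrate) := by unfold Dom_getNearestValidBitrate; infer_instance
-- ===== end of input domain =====

-- B: closed-form clamped floor-division replaces A's scan of the 10-element valid-bitrate list (objective: simpler).


-- ===== PORT A =====
-- validBitrates = [x * 32000 for x in range(1, 11)]
def validBitrates : List Int := (PySem.List.pyRange 1 11 1).map (fun x => x * 32000)

-- for-loop with break over validBitrates, accumulator validBitrate
def pvLoopA (bitrate : Int) : List Int → Int → Int
  | [], validBitrate => validBitrate
  | br :: rest, validBitrate =>
    if bitrate - br ≥ PySem.Int.floordiv (-32000) 2 then pvLoopA bitrate rest br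
    else validBitrate

def getNearestValidBitrate (bitrate : Int) : Int :=
  pvLoopA bitrate validBitrates 32000

-- ===== PORT B =====
def getNearestValidBitrate_alt (bitrate : Int) : Int :=
  let k := PySem.Int.floordiv (bitrate + 16000) 32000
  max 1 (min 10 k) * 32000

-- ===== PRECONDITION & SPEC =====
def Spec_getNearestValidBitrate (bitrate : Int) (out : Int) : Prop := out = getNearestValidBitrate_alt bitrate
instance (bitrate : Int) (out : Int) : Decidable (Spec_getNearestValidBitrate bitrate out) := by unfold Spec_getNearestValidBitrate; infer_instance

-- ===== CLAIM (what is proved, stated in full; the proofs are below) =====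
def Claim_equal_getNearestValidBitrate : Prop := ∀ (bitrate : Int), Dom_getNearestValidBitrate bitrate → Spec_getNearestValidBitrate bitrate (getNearestValidBitrate bitrate)

-- ===== LEMMAS AND PROOFS =====

-- the 10-element valid-bitrate list, evaluated
theorem validBitrates_eq : validBitrates = [32000, 64000, 96000, 128000, 160000, 192000, 224000, 256000, 288000, 320000] := by decide

-- the -32000 // 2 literal
theorem pvFloordivLit_eq : PySem.Int.floordiv (-32000) 2 = -16000 := by decide

-- Python floor division by the positive literal 32000 (and the -32000 // 2 literal) as Euclidean division, for omega
theorem pvFloordiv_eq (a : Int) : PySem.Int.floordiv a 32000 = a / 32000 := by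
  simp [PySem.Int.floordiv, Int.fdiv_eq_ediv]

-- ===== VERDICT (by name: the statement is the Claim_ definition above) =====
theorem getNearestValidBitrate_spec : Claim_equal_getNearestValidBitrate := by
  intro bitrate _
  unfold Spec_getNearestValidBitrate getNearestValidBitrate getNearestValidBitrate_alt
  rw [validBitrates_eq]
  simp only [pvLoopA, pvFloordiv_eq, pvFloordivLit_eq, ge_iff_le]
  split_ifs <;> omega
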